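-- pv_equiv track=rewrite | github.com/imsushant12/Python_Programs | good_string.py | solve
-- ===== SOURCE A (Python) =====
-- def solve(s):
--     stack = []
--
--     for i in range(len(s)):
--         if(len(stack) >= 1) and (abs(ord(s[i]) - ord(stack[-1])) == 32):
--             stack.pop()
--         else:
--             stack.append(s[i])
--
--     answer_string = "".join(stack)
--
--     if len(answer_string) > 0:
--         return answer_string
--     else:
--         return ""
-- ===== SOURCE B (Python) =====
-- def solve(s):
--     while True:
--         found = False
--         for i in range(len(s) - 1):
--             if abs(ord(s[i]) - ord(s[i + 1])) == 32:
--                 s = s[:i] + s[i + 2:]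
--                 found = True
--                 break
--         if not found:
--             return s
-- ===== Notes on version B (the rewrite author's own statement) =====
-- stated objective: alternative
-- what changed: Replaced A's single-pass stack with a fixpoint loop that repeatedly rescans the string, deletes the leftmost adjacent case-pair, and stops when no pair remains (leftmost cancellation makes this exactly equivalent).
import Mathlib
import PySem

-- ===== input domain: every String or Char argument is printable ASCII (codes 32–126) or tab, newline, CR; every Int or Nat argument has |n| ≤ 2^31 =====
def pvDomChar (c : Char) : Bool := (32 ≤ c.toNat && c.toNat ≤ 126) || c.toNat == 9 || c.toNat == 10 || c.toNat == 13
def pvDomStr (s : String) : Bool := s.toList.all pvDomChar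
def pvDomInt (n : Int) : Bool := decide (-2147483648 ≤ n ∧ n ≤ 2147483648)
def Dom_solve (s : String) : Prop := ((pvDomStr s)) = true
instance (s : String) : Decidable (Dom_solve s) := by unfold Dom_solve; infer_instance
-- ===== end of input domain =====

-- B replaces A's one-pass stack with a fixpoint loop that repeatedly deletes the
-- leftmost adjacent case-pair (objective: alternative algorithm; not faster).

-- ===== PORT A =====
-- abs(ord(a) - ord(b)) == 32
def pchk (a b : Char) : Bool := ((a.toNat : Int) - (b.toNat : Int)).natAbs == 32

-- the body of A's for-loop: pop on a case-pair with the stack top, else append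
def stepA (stack : List Char) (c : Char) : List Char :=
  if 1 ≤ stack.length ∧ pchk c (stack.getLastD ' ') then stack.dropLast
  else stack ++ [c]

def solve (s : String) : String :=
  let stack := s.toList.foldl stepA []
  let answer_string := String.mk stack
  if 0 < answer_string.length then answer_string else ""

-- ===== PORT B =====
-- B's inner for-loop: find the first adjacent case-pair and return the string without it
def findRemove : List Char → Option (List Char)
  | a :: b :: t => if pchk a b then some t else (findRemove (b :: t)).map (a :: ·)
  | _ => none

theorem findRemove_length : ∀ (l l' : List Char), findRemove l = some l' → l'.length < l.length := by
  intro l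
  induction l with
  | nil => intro l' h; simp [findRemove] at h
  | cons a t ih =>
    intro l' h
    cases t with
    | nil => simp [findRemove] at h
    | cons b u =>
      by_cases hp : pchk a b
      · simp [findRemove, hp] at h; subst h; simp
      · simp [findRemove, hp] at h
        obtain ⟨m, hm, rfl⟩ := h
        have hlen := ih m hm
        simp at hlen ⊢; omega

-- B's while-loop: repeat until a full scan finds no pair
def reduceFix (l : List Char) : List Char :=
  match h : findRemove l with
  | some l' => reduceFix l'
  | none => l
termination_by l.length
decreasing_by exact findRemove_length _ _ h

def solve_alt (s : String) : String := String.mk (reduceFix s.toList)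

-- ===== PRECONDITION & SPEC =====
def Spec_solve (s : String) (out : String) : Prop := out = solve_alt s
instance (s : String) (out : String) : Decidable (Spec_solve s out) := by unfold Spec_solve; infer_instance

-- ===== CLAIM (what is proved, stated in full; the proofs are below) =====
def Claim_equal_solve : Prop := ∀ (s : String), Dom_solve s → Spec_solve s (solve s)

-- ===== LEMMAS AND PROOFS =====

-- A's stack with the top at the head (stack reversed); used only in the proofs
def rstep (r : List Char) (c : Char) : List Char :=
  match r with
  | d :: t => if pchk c d then t else c :: d :: t
  | [] => [c]

theorem pchk_comm (a b : Char) : pchk a b = pchk b a := by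
  simp only [pchk]
  congr 1
  omega

theorem rstep_push (r : List Char) (c : Char)
    (h : ∀ d, r.head? = some d → pchk c d = false) : rstep r c = c :: r := by
  cases r with
  | nil => rfl
  | cons d t => simp [rstep, h d rfl]

theorem lem2 : ∀ (l l' r : List Char), findRemove l = some l' →
    (∀ d, r.head? = some d → ∀ c, l.head? = some c → pchk c d = false) →
    List.foldl rstep r l = List.foldl rstep r l' := by
  intro l
  induction l with
  | nil => intro l' r h _; simp [findRemove] at h
  | cons a t ih =>
    intro l' r h hb
    cases t with
    | nil => simp [findRemove] at h
    | cons b u =>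
      have hra : rstep r a = a :: r := rstep_push r a (fun d hd => hb d hd a rfl)
      by_cases hp : pchk a b
      · simp [findRemove, hp] at h
        subst h
        have hba : pchk b a = true := by rw [pchk_comm]; exact hp
        simp only [List.foldl]
        rw [hra]
        have hr2 : rstep (a :: r) b = r := by simp [rstep, hba]
        rw [hr2]
      · simp [findRemove, hp] at h
        obtain ⟨m, hm, rfl⟩ := h
        have hstep : List.foldl rstep (a :: r) (b :: u) = List.foldl rstep (a :: r) m := by
          apply ih m (a :: r) hm
          intro d hd c hc
          simp at hd hc
          subst hd; subst hc
          rw [pchk_comm]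
          simpa using hp
        simp only [List.foldl] at hstep ⊢
        rw [hra]
        exact hstep

theorem lem1 : ∀ (l r : List Char), findRemove l = none →
    (∀ d, r.head? = some d → ∀ c, l.head? = some c → pchk c d = false) →
    List.foldl rstep r l = l.reverse ++ r := by
  intro l
  induction l with
  | nil => intro r _ _; simp
  | cons c t ih =>
    intro r h hb
    have hrc : rstep r c = c :: r := rstep_push r c (fun d hd => hb d hd c rfl)
    cases t with
    | nil => simp [List.foldl, hrc]
    | cons b u =>
      have hp : pchk c b = false := by
        by_contra hx
        simp at hx
        simp [findRemove, hx] at h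
      have ht : findRemove (b :: u) = none := by
        by_contra hx
        cases hy : findRemove (b :: u) with
        | none => exact hx hy
        | some m => simp [findRemove, hp, hy] at h
      have := ih (c :: r) ht (by
        intro d hd e he
        simp at hd he
        subst hd; subst he
        rw [pchk_comm]; exact hp)
      simp only [List.foldl] at this ⊢
      rw [hrc, this]
      simp

theorem reduceFix_some : ∀ {l l' : List Char}, findRemove l = some l' → reduceFix l = reduceFix l' := by
  intro l l' h
  rw [reduceFix]
  split
  next m hm => rw [hm] at h; injection h with h2; rw [h2]
  next hm => rw [hm] at h; exact absurd h (by simp)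

theorem reduceFix_none : ∀ {l : List Char}, findRemove l = none → reduceFix l = l := by
  intro l h
  rw [reduceFix]
  split
  next m hm => rw [hm] at h; exact absurd h (by simp)
  next hm => rfl

theorem key : ∀ (l : List Char), List.foldl rstep [] l = (reduceFix l).reverse := by
  intro l
  induction l using reduceFix.induct with
  | case1 l l' h ih =>
    rw [lem2 l l' [] h (by intro d hd; simp at hd), ih, reduceFix_some h]
  | case2 l h =>
    rw [lem1 l [] h (by intro d hd; simp at hd), reduceFix_none h]
    simp

theorem stepA_eq (st : List Char) (c : Char) : stepA st c = (rstep st.reverse c).reverse := by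
  cases h : st.reverse with
  | nil =>
    have : st = [] := by simpa using congrArg List.reverse h
    subst this
    simp [stepA, rstep]
  | cons d rt =>
    have hst : st = rt.reverse ++ [d] := by
      have := congrArg List.reverse h
      simpa using this
    subst hst
    by_cases hp : pchk c d
    · simp [stepA, rstep, hp]
    · simp [stepA, rstep, hp]

theorem foldlA : ∀ (l : List Char) (st : List Char),
    List.foldl stepA st l = (List.foldl rstep st.reverse l).reverse := by
  intro l
  induction l with
  | nil => intro st; simp
  | cons c t ih =>
    intro st
    have h1 : (stepA st c).reverse = rstep st.reverse c := by
      rw [stepA_eq]; simp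
    simp only [List.foldl]
    rw [ih (stepA st c), h1]

theorem solve_eq_mk (s : String) : solve s = String.mk (s.toList.foldl stepA []) := by
  cases h : s.toList.foldl stepA [] with
  | nil => simp [solve, h]
  | cons a t => simp [solve, h]

-- ===== VERDICT (by name: the statement is the Claim_ definition above) =====
theorem solve_spec : Claim_equal_solve := by
  intro s _
  unfold Spec_solve
  rw [solve_eq_mk, solve_alt]
  have := foldlA s.toList []
  simp only [List.reverse_nil] at this
  rw [this, key, List.reverse_reverse]
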